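-- pv_equiv track=rewrite | github.com/Liza3t/Diskretka | dka.py | f
-- ===== SOURCE A (Python) =====
-- def f(s):
--     stack = []
--     i = 0
--
--     while i < len(s) and s[i] == 'a':
--         stack.append('х')  # х - просто метка для подсчета, добавляем, если видим а и тд
--         i += 1
--
--     while i < len(s) and s[i] == 'b':
--         stack.append('х')
--         i += 1
--
--     while i < len(s) and s[i] == 'c':
--         if stack:
--             stack.pop()
--             i += 1
--         else:
--             return False
--
--     return i == len(s) and not stack
-- ===== SOURCE B (Python) =====
-- def f(s):
--     t = s.lstrip('a')
--     p = len(s) - len(t)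
--     u = t.lstrip('b')
--     q = len(t) - len(u)
--     return u == 'c' * (p + q)
-- ===== Notes on version B (the rewrite author's own statement) =====
-- stated objective: simpler
-- what changed: Drops the stack and all three while loops: strips the two letter prefixes with lstrip and decides by one closed-form comparison of the remainder against the replicated third letter of length p+q.
import Mathlib
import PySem

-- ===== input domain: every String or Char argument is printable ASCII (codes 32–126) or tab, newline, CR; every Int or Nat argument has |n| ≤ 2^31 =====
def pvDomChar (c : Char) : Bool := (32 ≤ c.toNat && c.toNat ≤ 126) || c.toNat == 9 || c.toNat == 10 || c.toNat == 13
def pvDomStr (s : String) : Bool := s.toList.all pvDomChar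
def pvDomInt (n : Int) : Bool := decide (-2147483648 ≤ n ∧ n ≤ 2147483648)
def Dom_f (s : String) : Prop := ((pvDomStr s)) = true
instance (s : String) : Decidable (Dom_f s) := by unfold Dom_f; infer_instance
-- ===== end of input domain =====

-- B replaces A's stack and three while loops by lstrip-based prefix counts and one
-- closed-form comparison of the remainder; same O(n) cost, simpler decomposition.

-- ===== PORT A =====
-- first while loop: push 'х' for each leading 'a'
def fLoop1 (cs : List Char) (stack : List Char) (i : Nat) : List Char × Nat :=
  if i < cs.length ∧ cs[i]! = 'a' then fLoop1 cs (stack ++ ['х']) (i + 1)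
  else (stack, i)
termination_by cs.length - i
decreasing_by omega

-- second while loop: push 'х' for each following 'b'
def fLoop2 (cs : List Char) (stack : List Char) (i : Nat) : List Char × Nat :=
  if i < cs.length ∧ cs[i]! = 'b' then fLoop2 cs (stack ++ ['х']) (i + 1)
  else (stack, i)
termination_by cs.length - i
decreasing_by omega

-- third while loop: pop for each 'c'; none = the early `return False`
def fLoop3 (cs : List Char) (stack : List Char) (i : Nat) : Option (List Char × Nat) :=
  if i < cs.length ∧ cs[i]! = 'c' then
    match stack with
    | _ :: rest => fLoop3 cs rest (i + 1)
    | [] => none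
  else some (stack, i)
termination_by cs.length - i
decreasing_by omega

def f (s : String) : Bool :=
  let cs := s.toList
  let r1 := fLoop1 cs [] 0
  let r2 := fLoop2 cs r1.1 r1.2
  match fLoop3 cs r2.1 r2.2 with
  | none => false
  | some (stack, i) => i == cs.length && stack.isEmpty

-- ===== PORT B =====
-- lstrip('a') / lstrip('b') are exactly dropWhile on the characters; 'c'*(p+q) is replicate
def f_alt (s : String) : Bool :=
  let t := s.toList.dropWhile (fun c => c = 'a')
  let p := s.toList.length - t.length
  let u := t.dropWhile (fun c => c = 'b')
  let q := t.length - u.length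
  u == List.replicate (p + q) 'c'

-- ===== PRECONDITION & SPEC =====
def Spec_f (s : String) (out : Bool) : Prop := out = f_alt s
instance (s : String) (out : Bool) : Decidable (Spec_f s out) := by unfold Spec_f; infer_instance

-- ===== CLAIM (what is proved, stated in full; the proofs are below) =====
def Claim_equal_f : Prop := ∀ (s : String), Dom_f s → Spec_f s (f s)

-- ===== LEMMAS AND PROOFS =====

theorem takeWhile_len_le {p : Char → Bool} (l : List Char) :
    (l.takeWhile p).length ≤ l.length := by
  induction l with
  | nil => simp
  | cons a l ih => by_cases h : p a <;> simp [List.takeWhile, h]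
                   omega

theorem dropWhile_eq_drop {p : Char → Bool} (l : List Char) :
    l.dropWhile p = l.drop (l.takeWhile p).length := by
  induction l with
  | nil => simp
  | cons a l ih => by_cases h : p a <;> simp [List.takeWhile, List.dropWhile, h, ih]

theorem fLoop1_eq (cs : List Char) (stack : List Char) (i : Nat) :
    fLoop1 cs stack i =
      (stack ++ List.replicate ((cs.drop i).takeWhile (fun c => c = 'a')).length 'х',
       i + ((cs.drop i).takeWhile (fun c => c = 'a')).length) := by
  fun_induction fLoop1 cs stack i with
  | case1 stack i h ih =>
      obtain ⟨hi, ha⟩ := h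
      have hdrop : cs.drop i = cs[i] :: cs.drop (i + 1) := List.drop_eq_getElem_cons hi
      have hga : cs[i] = 'a' := by simpa [getElem!_pos cs i hi] using ha
      rw [ih, hdrop, hga]
      simp [List.takeWhile]
      refine ⟨?_, by omega⟩
      rw [← List.replicate_succ]
  | case2 stack i h =>
      rcases Nat.lt_or_ge i cs.length with hi | hi
      · have hdrop : cs.drop i = cs[i] :: cs.drop (i + 1) := List.drop_eq_getElem_cons hi
        have hna : ¬ cs[i] = 'a' := by
          intro hc; exact h ⟨hi, by simp [getElem!_pos cs i hi, hc]⟩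
        rw [hdrop]
        simp [List.takeWhile, hna]
      · simp [List.drop_eq_nil_of_le hi]

theorem fLoop2_eq (cs : List Char) (stack : List Char) (i : Nat) :
    fLoop2 cs stack i =
      (stack ++ List.replicate ((cs.drop i).takeWhile (fun c => c = 'b')).length 'х',
       i + ((cs.drop i).takeWhile (fun c => c = 'b')).length) := by
  fun_induction fLoop2 cs stack i with
  | case1 stack i h ih =>
      obtain ⟨hi, hb⟩ := h
      have hdrop : cs.drop i = cs[i] :: cs.drop (i + 1) := List.drop_eq_getElem_cons hi
      have hgb : cs[i] = 'b' := by simpa [getElem!_pos cs i hi] using hb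
      rw [ih, hdrop, hgb]
      simp [List.takeWhile]
      refine ⟨?_, by omega⟩
      rw [← List.replicate_succ]
  | case2 stack i h =>
      rcases Nat.lt_or_ge i cs.length with hi | hi
      · have hdrop : cs.drop i = cs[i] :: cs.drop (i + 1) := List.drop_eq_getElem_cons hi
        have hnb : ¬ cs[i] = 'b' := by
          intro hc; exact h ⟨hi, by simp [getElem!_pos cs i hi, hc]⟩
        rw [hdrop]
        simp [List.takeWhile, hnb]
      · simp [List.drop_eq_nil_of_le hi]

theorem fLoop3_eq (cs : List Char) (stack : List Char) (i : Nat) (hle : i ≤ cs.length) :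
    (match fLoop3 cs stack i with
      | none => false
      | some (st, j) => j == cs.length && st.isEmpty)
      = (cs.drop i == List.replicate stack.length 'c') := by
  fun_induction fLoop3 cs stack i with
  | case1 i h x rest ih =>
      obtain ⟨hi, hc⟩ := h
      have hdrop : cs.drop i = cs[i] :: cs.drop (i + 1) := List.drop_eq_getElem_cons hi
      have hgc : cs[i] = 'c' := by simpa [getElem!_pos cs i hi] using hc
      rw [ih hi, hdrop, hgc]
      simp [List.replicate_succ]
  | case2 i h =>
      obtain ⟨hi, hc⟩ := h
      have hdrop : cs.drop i = cs[i] :: cs.drop (i + 1) := List.drop_eq_getElem_cons hi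
      have hr : (List.drop i cs == List.replicate ([] : List Char).length 'c') = false :=
        beq_eq_false_iff_ne.mpr (by rw [hdrop]; exact List.cons_ne_nil _ _)
      simp only [hr]
  | case3 stack i h =>
      rcases Nat.lt_or_ge i cs.length with hi | hi
      · have hdrop : cs.drop i = cs[i] :: cs.drop (i + 1) := List.drop_eq_getElem_cons hi
        have hnc : ¬ cs[i] = 'c' := by
          intro hco; exact h ⟨hi, by simp [getElem!_pos cs i hi, hco]⟩
        have hne : i ≠ cs.length := by omega
        cases stack with
        | nil =>
            have h1 : (i == cs.length) = false := by simp [hne]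
            have hr : List.drop i cs ≠ List.replicate ([] : List Char).length 'c' := by
              rw [hdrop]; exact List.cons_ne_nil _ _
            simp only [h1, Bool.false_and, beq_eq_false_iff_ne.mpr hr]
        | cons y ys =>
            have h1 : (i == cs.length) = false := by simp [hne]
            have hr : List.drop i cs ≠ List.replicate (y :: ys).length 'c' := by
              rw [hdrop]
              simp only [List.length_cons, List.replicate_succ]
              intro hEq
              exact hnc (List.cons.inj hEq).1
            simp only [h1, Bool.false_and, beq_eq_false_iff_ne.mpr hr]
      · have hieq : i = cs.length := le_antisymm hle hi
        subst hieq
        simp [List.drop_length]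
        cases stack <;> simp

-- ===== VERDICT (by name: the statement is the Claim_ definition above) =====
theorem f_spec : Claim_equal_f := by
  intro s _
  unfold Spec_f f f_alt
  simp only []
  set cs := s.toList with hcs
  rw [fLoop1_eq, fLoop2_eq]
  set p := ((cs.drop 0).takeWhile (fun c => c = 'a')).length with hp
  set q := ((cs.drop (0 + p)).takeWhile (fun c => c = 'b')).length with hq
  have hp0 : (cs.takeWhile (fun c => c = 'a')).length = p := by
    simp [hp]
  have hq0 : ((cs.drop p).takeWhile (fun c => c = 'b')).length = q := by
    simp [hq]
  have ht : cs.dropWhile (fun c => c = 'a') = cs.drop p := by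
    rw [dropWhile_eq_drop, hp0]
  have hu : (cs.drop p).dropWhile (fun c => c = 'b') = cs.drop (p + q) := by
    rw [dropWhile_eq_drop, hq0, List.drop_drop]
  have hp_le : p ≤ cs.length := by
    have := takeWhile_len_le (p := fun c => decide (c = 'a')) cs
    omega
  have hq_le : q ≤ (cs.drop p).length := by
    have := takeWhile_len_le (p := fun c => decide (c = 'b')) (cs.drop p)
    omega
  have hdl : (cs.drop p).length = cs.length - p := by simp
  have hpq_le : 0 + p + q ≤ cs.length := by omega
  rw [fLoop3_eq cs _ _ hpq_le]
  rw [ht, hu]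
  have h1 : cs.length - (cs.drop p).length = p := by omega
  have h2 : (cs.drop p).length - (cs.drop (p + q)).length = q := by
    have : (cs.drop (p + q)).length = cs.length - (p + q) := by simp
    omega
  rw [h1, h2]
  simp
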